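-- pv_equiv track=rewrite | github.com/kevinpt/ripyl | ripyl/protocol/can.py | _stuffed_index
-- ===== SOURCE A (Python) =====
-- def _stuffed_index(stuffed_bits, ix):
--     '''Return the adjusted bit index with correction for stuffed bits'''
--     real_ix = 0
--     eff_ix = -1
--
--     while True:
--         if real_ix not in stuffed_bits:
--             eff_ix += 1
--
--         if eff_ix == ix:
--             break
--
--         real_ix += 1
--
--     return real_ix
-- ===== SOURCE B (Python) =====
-- def _stuffed_index(stuffed_bits, ix):
--     '''Return the adjusted bit index with correction for stuffed bits'''
--     real_ix = ix
--     for s in sorted(set(stuffed_bits)):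
--         if 0 <= s <= real_ix:
--             real_ix += 1
--     return real_ix
-- ===== Notes on version B (the rewrite author's own statement) =====
-- stated objective: alternative
-- what changed: A scans bit positions one by one from 0, doing a list membership test per position until the (ix+1)-th non-stuffed position is found; B instead starts at ix and makes a single pass over sorted(set(stuffed_bits)), bumping the index once for each stuffed position it has passed, so its cost depends only on the number of stuffed bits, not on ix.
-- outside the precondition, e.g. on _stuffed_index({0}, -1): A returns 0, B returns -1; on _stuffed_index(set(), -1): A does not finish within the time limit, B returns -1
import Mathlib
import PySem

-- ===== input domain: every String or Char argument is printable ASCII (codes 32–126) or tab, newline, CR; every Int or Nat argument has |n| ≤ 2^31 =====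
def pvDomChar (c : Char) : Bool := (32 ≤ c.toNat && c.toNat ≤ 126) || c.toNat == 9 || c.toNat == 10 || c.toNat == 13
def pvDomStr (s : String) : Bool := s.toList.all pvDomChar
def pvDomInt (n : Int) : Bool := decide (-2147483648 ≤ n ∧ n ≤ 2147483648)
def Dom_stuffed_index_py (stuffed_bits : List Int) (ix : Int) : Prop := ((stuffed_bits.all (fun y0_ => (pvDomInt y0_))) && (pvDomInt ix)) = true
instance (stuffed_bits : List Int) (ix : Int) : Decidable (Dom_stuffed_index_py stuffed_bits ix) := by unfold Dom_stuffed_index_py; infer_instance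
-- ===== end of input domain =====

-- B replaces A's bit-by-bit scan (one list membership test per bit position) by a single pass
-- over the sorted distinct stuffed positions; objective: alternative algorithm, same result.

-- ===== PORT A =====
-- the 'while True' loop of A; the fuel only makes it total (for 0 ≤ ix the loop is reached
-- well before fuel runs out, see lemma loopA_eq below)
def stuffedLoopA (sb : List Int) (ix : Int) : Nat → Int → Int → Int
  | 0, real, _ => real
  | fuel+1, real, eff =>
    let eff' := if sb.contains real then eff else eff + 1
    if eff' = ix then real else stuffedLoopA sb ix fuel (real + 1) eff'

def stuffed_index_py (stuffed_bits : List Int) (ix : Int) : Int :=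
  stuffedLoopA stuffed_bits ix (ix.toNat + stuffed_bits.length + 1) 0 (-1)

-- ===== PORT B =====
def stuffed_index_py_alt (stuffed_bits : List Int) (ix : Int) : Int :=
  (PySem.List.sorted (PySem.Set.ofList stuffed_bits) (fun x => x) false).foldl
    (fun r s => if 0 ≤ s ∧ s ≤ r then r + 1 else r) ix

-- ===== PRECONDITION & SPEC =====
-- Pre_ excludes negative ix: there A's loop never reaches eff_ix == ix and diverges, except in the
-- accidental corner ix = -1 with 0 stuffed, where A returns 0 (an artefact of the initial
-- eff_ix = -1); B naturally returns ix there.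
def Pre_stuffed_index_py (stuffed_bits : List Int) (ix : Int) : Prop := 0 ≤ ix
instance (stuffed_bits : List Int) (ix : Int) : Decidable (Pre_stuffed_index_py stuffed_bits ix) := by unfold Pre_stuffed_index_py; infer_instance
def pvWitness_stuffed_index_py : List Int × Int := ([0, 2, 7], 3)

def Spec_stuffed_index_py (stuffed_bits : List Int) (ix : Int) (out : Int) : Prop := out = stuffed_index_py_alt stuffed_bits ix
instance (stuffed_bits : List Int) (ix : Int) (out : Int) : Decidable (Spec_stuffed_index_py stuffed_bits ix out) := by unfold Spec_stuffed_index_py; infer_instance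

-- ===== CLAIM (what is proved, stated in full; the proofs are below) =====
def Claim_equal_stuffed_index_py : Prop := ∀ (stuffed_bits : List Int) (ix : Int), Dom_stuffed_index_py stuffed_bits ix → Pre_stuffed_index_py stuffed_bits ix → Spec_stuffed_index_py stuffed_bits ix (stuffed_index_py stuffed_bits ix)

-- ===== LEMMAS AND PROOFS =====

-- number of elements of L that are ≤ x
def cntLe (L : List Int) (x : Int) : Int := (L.countP (fun s => decide (s ≤ x)) : Int)

lemma cntLe_nonneg (L : List Int) (x : Int) : 0 ≤ cntLe L x := by
  simp [cntLe]

lemma cntLe_le_length (L : List Int) (x : Int) : cntLe L x ≤ (L.length : Int) := by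
  have := List.countP_le_length (l := L) (p := fun s => decide (s ≤ x))
  simp [cntLe]; exact_mod_cast this

lemma cntLe_neg (L : List Int) (x : Int) (hx : x < 0) (h : ∀ s ∈ L, 0 ≤ s) : cntLe L x = 0 := by
  simp only [cntLe]
  have : L.countP (fun s => decide (s ≤ x)) = 0 := by
    rw [List.countP_eq_zero]
    intro s hs
    have := h s hs
    simp; omega
  simp [this]

-- step rule: cntLe at x counts x itself iff x ∈ L (L without duplicates)
lemma cntLe_step (L : List Int) (hnd : L.Nodup) (x : Int) :
    cntLe L x = cntLe L (x - 1) + (if x ∈ L then 1 else 0) := by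
  induction L with
  | nil => simp [cntLe]
  | cons a t ih =>
    obtain ⟨hat, hndt⟩ := List.nodup_cons.mp hnd
    have iht := ih hndt
    simp only [cntLe, List.countP_cons, List.mem_cons] at iht ⊢
    push_cast at iht ⊢
    by_cases hax : x = a <;> by_cases hxt : x ∈ t <;>
      first
      | (exfalso; rw [hax] at hxt; exact hat hxt)
      | (split_ifs at iht ⊢ <;> simp_all <;> omega)

-- B's inner fold over a list whose elements all exceed the accumulator does nothing
lemma foldB_const (L : List Int) : ∀ a : Int, (∀ s ∈ L, a < s) →
    L.foldl (fun r s => if s ≤ r then r + 1 else r) a = a := by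
  induction L with
  | nil => intro a _; rfl
  | cons s t ih =>
    intro a h
    have hs : a < s := h s (by simp)
    have : ¬ s ≤ a := by omega
    simp only [List.foldl_cons, this, if_false]
    exact ih a (fun x hx => h x (by simp [hx]))

-- characterisation of B's fold on a strictly increasing list
lemma foldB_char (L : List Int) : L.Pairwise (· < ·) → ∀ a : Int,
    a ≤ L.foldl (fun r s => if s ≤ r then r + 1 else r) a ∧
    L.foldl (fun r s => if s ≤ r then r + 1 else r) a
      = a + cntLe L (L.foldl (fun r s => if s ≤ r then r + 1 else r) a) ∧
    (∀ x : Int, a ≤ x → x < L.foldl (fun r s => if s ≤ r then r + 1 else r) a →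
      x < a + cntLe L x) := by
  induction L with
  | nil =>
    intro _ a
    refine ⟨le_refl a, by simp [cntLe], ?_⟩
    intro x h1 h2; simp at h2; omega
  | cons s t ih =>
    intro hp a
    have hgt : ∀ y ∈ t, s < y := fun y hy => (List.pairwise_cons.mp hp).1 y hy
    have hpt : t.Pairwise (· < ·) := (List.pairwise_cons.mp hp).2
    by_cases hsa : s ≤ a
    · simp only [List.foldl_cons, hsa, if_true]
      obtain ⟨h1, h2, h3⟩ := ih hpt (a + 1)
      set r := t.foldl (fun r s => if s ≤ r then r + 1 else r) (a + 1) with hr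
      have hsr : s ≤ r := by omega
      have hcnt : cntLe (s :: t) r = 1 + cntLe t r := by
        simp [cntLe, List.countP_cons, hsr]; push_cast; omega
      refine ⟨by omega, by rw [hcnt]; omega, ?_⟩
      intro x hax hxr
      have hsx : s ≤ x := by omega
      have hcx : cntLe (s :: t) x = 1 + cntLe t x := by
        simp [cntLe, List.countP_cons, hsx]; push_cast; omega
      rw [hcx]
      by_cases hx1 : a + 1 ≤ x
      · have := h3 x hx1 hxr; omega
      · have := cntLe_nonneg t x; omega
    · simp only [List.foldl_cons, hsa, if_false]
      have hconst : t.foldl (fun r s => if s ≤ r then r + 1 else r) a = a :=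
        foldB_const t a (fun y hy => by have := hgt y hy; omega)
      rw [hconst]
      have hcnt : cntLe (s :: t) a = 0 := by
        simp only [cntLe, List.countP_cons]
        have h0 : t.countP (fun y => decide (y ≤ a)) = 0 := by
          rw [List.countP_eq_zero]; intro y hy
          have := hgt y hy; simp; omega
        simp [h0, hsa]
      refine ⟨le_refl a, by rw [hcnt]; omega, ?_⟩
      intro x h1 h2; omega

-- B's fold with the 0 ≤ s test equals the plain fold over the nonnegative elements
lemma foldB_filter (L : List Int) : ∀ a : Int, 0 ≤ a →
    L.foldl (fun r s => if 0 ≤ s ∧ s ≤ r then r + 1 else r) a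
      = (L.filter (fun s => decide (0 ≤ s))).foldl (fun r s => if s ≤ r then r + 1 else r) a := by
  induction L with
  | nil => intro a _; rfl
  | cons s t ih =>
    intro a ha
    by_cases hs : 0 ≤ s
    · simp only [List.foldl_cons, List.filter_cons, hs, decide_true, if_true, List.foldl_cons]
      by_cases hsr : s ≤ a
      · simp only [hs, hsr, and_self, if_true]
        exact ih (a + 1) (by omega)
      · simp only [hsr, and_false, if_false]
        exact ih a ha
    · have : ¬ (0 ≤ s ∧ s ≤ a) := fun h => hs h.1
      simp only [List.foldl_cons, List.filter_cons, this, if_false]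
      simp only [hs, decide_false]
      simpa using ih a ha

-- the while-loop of A, run from an invariant state, reaches exactly the fixed point T
lemma loopA_eq (sb L : List Int) (ix : Int)
    (hmem : ∀ n : Int, 0 ≤ n → (sb.contains n = true ↔ n ∈ L))
    (hnd : L.Nodup) (hnn : ∀ s ∈ L, 0 ≤ s) (T : Int)
    (hT : T = ix + cntLe L T)
    (hmin : ∀ x : Int, 0 ≤ x → x < T → x < ix + cntLe L x) :
    ∀ (fuel : Nat) (real eff : Int), 0 ≤ real → real ≤ T → T - real < (fuel : Int) →
      eff = real - 1 - cntLe L (real - 1) →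
      stuffedLoopA sb ix fuel real eff = T := by
  intro fuel
  induction fuel with
  | zero => intro real eff h1 h2 h3 _; exfalso; simp at h3; omega
  | succ f ih =>
    intro real eff h1 h2 h3 heff
    have hstep : cntLe L real = cntLe L (real - 1) + (if real ∈ L then 1 else 0) :=
      cntLe_step L hnd real
    have hmemr := hmem real h1
    have heff' : (if sb.contains real then eff else eff + 1) = real - cntLe L real := by
      by_cases hr : real ∈ L
      · have hc : sb.contains real = true := hmemr.mpr hr
        rw [if_pos hc, heff, hstep, if_pos hr]
        omega
      · have hc : ¬ sb.contains real = true := fun h => hr (hmemr.mp h)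
        rw [if_neg hc, heff, hstep, if_neg hr]
        omega
    simp only [stuffedLoopA, heff']
    by_cases hrT : real = T
    · have : real - cntLe L real = ix := by rw [hrT]; omega
      rw [if_pos this]
      exact hrT
    · have hlt : real < T := by omega
      have hne : real - cntLe L real ≠ ix := by
        have := hmin real h1 hlt; omega
      simp only [hne, if_false]
      exact ih (real + 1) (real - cntLe L real) (by omega) (by omega) (by push_cast at h3 ⊢; omega)
        (by simp)

-- the deduplicated list is never longer than the original
lemma length_ofList_le (xs : List Int) : (PySem.Set.ofList xs).length ≤ xs.length := by
  have h : ∀ (s : List Int) (l : List Int),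
      (l.foldl PySem.Set.add s).length ≤ s.length + l.length := by
    intro s l
    induction l generalizing s with
    | nil => simp
    | cons a t ih =>
      simp only [List.foldl_cons]
      have hadd : (PySem.Set.add s a).length ≤ s.length + 1 := by
        simp only [PySem.Set.add]
        split
        · omega
        · simp
      calc (t.foldl PySem.Set.add (PySem.Set.add s a)).length
          ≤ (PySem.Set.add s a).length + t.length := ih _
        _ ≤ s.length + 1 + t.length := by omega
        _ = s.length + (a :: t).length := by simp; omega
  have := h [] xs
  simpa [PySem.Set.ofList_eq_foldl] using this

-- ===== VERDICT (by name: the statement is the Claim_ definition above) =====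
theorem stuffed_index_py_spec : Claim_equal_stuffed_index_py := by
  intro sb ix _hdom hpre
  unfold Spec_stuffed_index_py
  have hix : 0 ≤ ix := hpre
  set Ls := PySem.List.sorted (PySem.Set.ofList sb) (fun x => x) false with hLs
  set L := Ls.filter (fun s => decide (0 ≤ s)) with hLdef
  -- strict sortedness, nodup, nonnegativity
  have hps : Ls.Pairwise (· < ·) := PySem.List.sorted_ofList_pairwise_lt (xs := sb)
  have hpL : L.Pairwise (· < ·) := List.Pairwise.filter _ hps
  have hnd : L.Nodup := hpL.imp (fun h => ne_of_lt h)
  have hnn : ∀ s ∈ L, 0 ≤ s := by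
    intro s hs
    have := (List.mem_filter.mp hs).2
    simpa using this
  -- B's value
  have hBval : stuffed_index_py_alt sb ix
      = L.foldl (fun r s => if s ≤ r then r + 1 else r) ix := by
    unfold stuffed_index_py_alt
    rw [← hLs, foldB_filter Ls ix hix, hLdef]
  set T := L.foldl (fun r s => if s ≤ r then r + 1 else r) ix with hTdef
  obtain ⟨hle, hfix, hmin'⟩ := foldB_char L hpL ix
  have hT : T = ix + cntLe L T := hfix
  have hmin : ∀ x : Int, 0 ≤ x → x < T → x < ix + cntLe L x := by
    intro x hx hxT
    by_cases hxi : ix ≤ x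
    · exact hmin' x hxi hxT
    · have := cntLe_nonneg L x; omega
  have hmem : ∀ n : Int, 0 ≤ n → (sb.contains n = true ↔ n ∈ L) := by
    intro n hn
    rw [hLdef, hLs]
    simp [List.mem_filter, PySem.List.mem_sorted, PySem.Set.mem_ofList, hn]
  -- bound on T for the fuel
  have hTbound : T ≤ ix + (sb.length : Int) := by
    have h1 : cntLe L T ≤ (L.length : Int) := cntLe_le_length L T
    have h2 : L.length ≤ Ls.length := List.length_filter_le _ _
    have h3 : Ls.length = (PySem.Set.ofList sb).length := by
      rw [hLs]; simp [PySem.List.length_sorted]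
    have h4 : (PySem.Set.ofList sb).length ≤ sb.length := length_ofList_le sb
    have h24 : L.length ≤ sb.length := by omega
    have : cntLe L T ≤ (sb.length : Int) := le_trans h1 (by exact_mod_cast h24)
    omega
  -- run the loop
  have hrun := loopA_eq sb L ix hmem hnd hnn T hT hmin
    (ix.toNat + sb.length + 1) 0 (-1) (le_refl 0) (by omega)
    (by push_cast; omega)
    (by rw [cntLe_neg L (0 - 1) (by omega) hnn]; omega)
  unfold stuffed_index_py
  rw [hrun, hBval]
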